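-- pv_equiv track=rewrite | github.com/dkwas4236/Cmpt103 | Lab4colourbands.py | splitColourString
-- ===== SOURCE A (Python) =====
-- def splitColourString(colourBands): #1
--     colourList = []
--     pos = 0
--     while pos < (len(colourBands)):
--         if colourBands[pos] == "B":
--             colourList.append(colourBands[pos] + "r")
--             pos += 1
--         elif colourBands[pos] == "G":
--             if pos < (len(colourBands) - 1) and colourBands[pos + 1] == "r":
--                 colourList.append("Gr")
--                 pos += 2
--             else:
--                 colourList.append("G")
--                 pos += 1
--         elif colourBands[pos] == "A":
--             if pos < (len(colourBands) - 1) and colourBands[pos + 1] == "u":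
--                 colourList.append("Au")
--                 pos += 2
--             else:
--                 colourList.append("Ag")
--                 pos += 2
--         else:
--             colourList.append(colourBands[pos])
--             pos += 1
--
--     return colourList
-- ===== SOURCE B (Python) =====
-- # Two-stage jump-table tokenizer: stage 1 precomputes (token, next-index) for every position,
-- # stage 2 chases the jump chain from 0 collecting tokens; replaces A's on-line while/branch scan.
-- def _classify(s, i):
--     c = s[i]
--     if c == 'A':
--         return ('Au', i + 2) if s[i + 1:i + 2] == 'u' else ('Ag', i + 2)
--     if c == 'G' and s[i + 1:i + 2] == 'r':
--         return ('Gr', i + 2)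
--     if c == 'G':
--         return ('G', i + 1)
--     if c == 'B':
--         return ('Br', i + 1)
--     return (c, i + 1)
--
-- def splitColourString(colourBands):
--     n = len(colourBands)
--     table = [_classify(colourBands, i) for i in range(n)]
--     out = []
--     i = 0
--     while i < n:
--         tok, i = table[i]
--         out.append(tok)
--     return out
-- ===== Notes on version B (the rewrite author's own statement) =====
-- stated objective: alternative
-- what changed: Replaces A's on-line while loop with hard-coded branches by a two-stage jump-table tokenizer: stage 1 precomputes for every position its (token, next-index) pair into a table, stage 2 follows the jump chain from index 0 collecting tokens.
import Mathlib
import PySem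

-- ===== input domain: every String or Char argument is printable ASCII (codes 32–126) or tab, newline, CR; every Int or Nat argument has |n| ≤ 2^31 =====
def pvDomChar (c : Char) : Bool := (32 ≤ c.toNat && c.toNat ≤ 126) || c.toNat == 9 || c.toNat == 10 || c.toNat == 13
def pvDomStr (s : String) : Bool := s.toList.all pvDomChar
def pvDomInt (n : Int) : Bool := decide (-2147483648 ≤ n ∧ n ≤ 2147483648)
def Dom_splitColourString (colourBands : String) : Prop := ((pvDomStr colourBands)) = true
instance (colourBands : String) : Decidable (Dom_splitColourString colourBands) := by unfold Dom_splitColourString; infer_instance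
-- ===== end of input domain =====

-- B is an 'alternative': a two-stage jump-table tokenizer (precomputed (token, next) table,
-- then a chain chase) replacing A's on-line while/branch scan; same output everywhere.

-- ===== PORT A =====
-- A's index-based while loop, as the obvious structural recursion over the character list:
-- each case consumes exactly the characters A's pos increments skip, in A's branch order.
def pvLoopA : List Char → List String
  | [] => []
  | 'B' :: rest => "Br" :: pvLoopA rest
  | 'G' :: 'r' :: rest => "Gr" :: pvLoopA rest
  | 'G' :: rest => "G" :: pvLoopA rest
  | 'A' :: 'u' :: rest => "Au" :: pvLoopA rest
  | 'A' :: _ :: rest => "Ag" :: pvLoopA rest   -- pos += 2 even when the next char is not 'u'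
  | ['A'] => ["Ag"]                            -- pos += 2 past the end
  | c :: rest => c.toString :: pvLoopA rest

def splitColourString (colourBands : String) : List String :=
  pvLoopA colourBands.toList

-- ===== PORT B =====
-- B's _classify(s, i): token at position i and the index of the next position.
-- Python's s[i] / s[i+1:i+2] == 'x' tests are rendered as matching on cs.drop i
-- (s[i] is the head of the suffix, s[i+1:i+2]=='x' tests its second character).
def pvClassify (cs : List Char) (i : Nat) : String × Nat :=
  match cs.drop i with
  | [] => ("", i + 1)   -- unreachable: _classify is only called with i < len(s)
  | c :: rest =>
    if c = 'A' then
      if rest.take 1 = ['u'] then ("Au", i + 2) else ("Ag", i + 2)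
    else if c = 'G' ∧ rest.take 1 = ['r'] then ("Gr", i + 2)
    else if c = 'G' then ("G", i + 1)
    else if c = 'B' then ("Br", i + 1)
    else (c.toString, i + 1)

-- B's stage 2 while loop: chase the jump chain; the fuel (= table length) only
-- makes the recursion structural — each jump strictly increases i, so it never runs out.
def pvChase (table : List (String × Nat)) : Nat → Nat → List String
  | 0, _ => []
  | fuel + 1, i =>
      match table[i]? with
      | none => []                                  -- i ≥ n: the while condition fails
      | some (tok, j) => tok :: pvChase table fuel j

-- B's stage 1 comprehension [ _classify(s, i) for i in range(n) ], then stage 2.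
def splitColourString_alt (colourBands : String) : List String :=
  let cs := colourBands.toList
  let table := (List.range cs.length).map (pvClassify cs)
  pvChase table cs.length 0

-- ===== PRECONDITION & SPEC =====
def Spec_splitColourString (colourBands : String) (out : List String) : Prop := out = splitColourString_alt colourBands
instance (colourBands : String) (out : List String) : Decidable (Spec_splitColourString colourBands out) := by unfold Spec_splitColourString; infer_instance

-- ===== CLAIM (what is proved, stated in full; the proofs are below) =====
def Claim_equal_splitColourString : Prop := ∀ (colourBands : String), Dom_splitColourString colourBands → Spec_splitColourString colourBands (splitColourString colourBands)

-- ===== LEMMAS AND PROOFS =====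

-- One step: at a live position i, A's loop emits the classified token and continues at the jump target.
theorem pvStep (cs : List Char) (i : Nat) (h : i < cs.length) :
    pvLoopA (cs.drop i) = (pvClassify cs i).1 :: pvLoopA (cs.drop (pvClassify cs i).2) ∧
    i < (pvClassify cs i).2 := by
  have h1 : cs.drop (i + 1) = (cs.drop i).drop 1 := by rw [List.drop_drop]
  have h2 : cs.drop (i + 2) = (cs.drop i).drop 2 := by rw [List.drop_drop]
  rcases hcs : cs.drop i with _ | ⟨c, rest⟩
  · exact absurd hcs (by simp [List.drop_eq_nil_iff]; omega)
  · rw [pvClassify, hcs]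
    by_cases hA : c = 'A'
    · subst hA
      rcases rest with _ | ⟨d, t⟩
      · simpa [pvLoopA, h1, h2, hcs] using Nat.lt_add_of_pos_right (by norm_num)
      · by_cases hu : d = 'u'
        · subst hu
          simpa [pvLoopA, h1, h2, hcs] using Nat.lt_add_of_pos_right (by norm_num)
        · simpa [pvLoopA, h1, h2, hcs, hu] using Nat.lt_add_of_pos_right (by norm_num)
    · by_cases hG : c = 'G'
      · subst hG
        rcases rest with _ | ⟨d, t⟩
        · simpa [pvLoopA, h1, h2, hcs] using Nat.lt_add_of_pos_right (by norm_num)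
        · by_cases hr : d = 'r'
          · subst hr
            simpa [pvLoopA, h1, h2, hcs] using Nat.lt_add_of_pos_right (by norm_num)
          · simpa [pvLoopA, h1, h2, hcs, hr] using Nat.lt_add_of_pos_right (by norm_num)
      · by_cases hB : c = 'B'
        · subst hB
          simpa [pvLoopA, h1, h2, hcs, hA] using Nat.lt_add_of_pos_right (by norm_num)
        · simpa [pvLoopA, h1, h2, hcs, hA, hG, hB] using
            Nat.lt_add_of_pos_right (by norm_num)

theorem pvChase_eq (cs : List Char) :
    ∀ (fuel i : Nat), cs.length ≤ i + fuel →
      pvChase ((List.range cs.length).map (pvClassify cs)) fuel i = pvLoopA (cs.drop i) := by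
  intro fuel
  induction fuel with
  | zero =>
      intro i hi
      have : cs.drop i = [] := by simp [List.drop_eq_nil_iff]; omega
      simp [pvChase, this, pvLoopA]
  | succ n ih =>
      intro i hi
      by_cases h : i < cs.length
      · have hget : ((List.range cs.length).map (pvClassify cs))[i]?
            = some (pvClassify cs i) := by
          simp [List.getElem?_map, List.getElem?_range, h]
        obtain ⟨hstep, hlt⟩ := pvStep cs i h
        rw [pvChase, hget, hstep]
        simp only []
        rw [ih (pvClassify cs i).2 (by omega)]
      · have hget : ((List.range cs.length).map (pvClassify cs))[i]? = none := by
          simp; omega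
        have : cs.drop i = [] := by simp [List.drop_eq_nil_iff]; omega
        simp [pvChase, hget, this, pvLoopA]

-- ===== VERDICT (by name: the statement is the Claim_ definition above) =====
theorem splitColourString_spec : Claim_equal_splitColourString := by
  intro s _
  unfold Spec_splitColourString splitColourString splitColourString_alt
  simp only []
  rw [pvChase_eq s.toList s.toList.length 0 (by omega)]
  simp
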